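-- pv_equiv track=rewrite | github.com/bedbugs-bit/Leetcode-Python | array_or_strings/palindrome.py | getMaxOccurrences
-- ===== SOURCE A (Python) =====
-- from collections import defaultdict
--
-- def getMaxOccurrences(components, minLength, maxLength, maxUnique):
--     """
--
--     Solution
--
--     - iterate at the starting index whilst expanding the substring to the maxLength
--     - added helper function to implement set data structure ensuring unique chars and a function to return a bool if a substring is valid
--
--     - time complexity of O(n), space complexity of O(n^2)
--     """
--     # Write your code here
--     substring_count = defaultdict(int)
--
--     def count_unique_chars(substring):
--         return len(set(substring))
--
--     def is_valid_substring(substring):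
--         if len(substring) < minLength or len(substring) > maxLength:
--             return False
--         if count_unique_chars(substring) > maxUnique:
--             return False
--
--         return True
--
--     for i in range(len(components)):
--         substr = ""
--
--         for j in range(i, min(len(components), i + maxLength)):
--             substr += components[j]
--
--             if is_valid_substring(substr):
--                 substring_count[substr] += 1
--
--     return max(substring_count.values(), default=0)
-- ===== SOURCE B (Python) =====
-- def getMaxOccurrences(components, minLength, maxLength, maxUnique):
--     # Only windows of the shortest valid length matter: any valid substring's
--     # length-L prefix occurs at least as often and is itself valid.
--     L = max(minLength, 1)
--     if L > maxLength:
--         return 0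
--     counts = {}
--     for i in range(len(components) - L + 1):
--         window = components[i:i + L]
--         if len(set(window)) <= maxUnique:
--             counts[window] = counts.get(window, 0) + 1
--     return max(counts.values(), default=0)
-- ===== Notes on version B (the rewrite author's own statement) =====
-- stated objective: faster
-- what changed: Instead of enumerating every substring of every length up to maxLength from every start index, B counts only windows of the single shortest valid length L = max(minLength,1): any valid substring's length-L prefix is itself valid and occurs at least as often, so the maximum frequency is attained there.
import Mathlib
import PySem

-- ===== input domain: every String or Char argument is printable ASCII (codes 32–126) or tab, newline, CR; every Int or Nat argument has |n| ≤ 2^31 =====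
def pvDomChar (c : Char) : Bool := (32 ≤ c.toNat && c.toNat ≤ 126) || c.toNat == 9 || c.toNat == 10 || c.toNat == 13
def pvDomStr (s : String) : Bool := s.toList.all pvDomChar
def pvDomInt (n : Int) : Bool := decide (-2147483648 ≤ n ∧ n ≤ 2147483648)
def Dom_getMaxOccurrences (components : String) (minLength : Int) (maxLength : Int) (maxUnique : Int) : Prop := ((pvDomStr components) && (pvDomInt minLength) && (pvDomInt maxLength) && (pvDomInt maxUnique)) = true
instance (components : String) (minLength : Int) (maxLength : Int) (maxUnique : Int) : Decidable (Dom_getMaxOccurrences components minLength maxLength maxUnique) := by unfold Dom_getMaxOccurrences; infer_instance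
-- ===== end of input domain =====

-- B counts only windows of the single shortest valid length L = max(minLength,1); the
-- length-L prefix of any valid substring is valid and at least as frequent, so the answer agrees.


-- ===== PORT A =====
-- helper count_unique_chars: len(set(substring))
def pvCountUniqueChars (substring : List Char) : Int := ((PySem.Set.ofList substring).length : Int)

-- helper is_valid_substring (captures minLength/maxLength/maxUnique)
def pvIsValidSubstring (minLength maxLength maxUnique : Int) (substring : List Char) : Bool :=
  if (substring.length : Int) < minLength ∨ (substring.length : Int) > maxLength then false
  else if pvCountUniqueChars substring > maxUnique then false
  else true

-- components[j] is ported as pyGetD with an arbitrary default: j always lies in range(len(components)) here,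
-- so the default is never read (exact on every reachable index).
def getMaxOccurrences (components : String) (minLength : Int) (maxLength : Int) (maxUnique : Int) : Int :=
  let cs := components.toList
  let substringCount :=
    (PySem.List.pyRange 0 (cs.length : Int) 1).foldl
      (fun d i =>
        ((PySem.List.pyRange i (min (cs.length : Int) (i + maxLength)) 1).foldl
          (fun (p : List Char × PySem.Dict (List Char) Int) j =>
            let substr := p.1 ++ [PySem.List.pyGetD cs j ' ']
            (substr,
              if pvIsValidSubstring minLength maxLength maxUnique substr then
                p.2.modify substr 0 (· + 1)
              else p.2))
          (([] : List Char), d)).2)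
      PySem.Dict.empty
  PySem.List.maxD substringCount.values (fun v => v) 0

-- ===== PORT B =====
def getMaxOccurrences_alt (components : String) (minLength : Int) (maxLength : Int) (maxUnique : Int) : Int :=
  let L := max minLength 1
  if L > maxLength then 0
  else
    let cs := components.toList
    let counts :=
      (PySem.List.pyRange 0 ((cs.length : Int) - L + 1) 1).foldl
        (fun d i =>
          let window := PySem.List.slice cs (some i) (some (i + L))
          if ((PySem.Set.ofList window).length : Int) ≤ maxUnique then
            d.insert window (d.getD window 0 + 1)
          else d)
        PySem.Dict.empty
    PySem.List.maxD counts.values (fun v => v) 0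

-- ===== PRECONDITION & SPEC =====
def Spec_getMaxOccurrences (components : String) (minLength : Int) (maxLength : Int) (maxUnique : Int) (out : Int) : Prop := out = getMaxOccurrences_alt components minLength maxLength maxUnique
instance (components : String) (minLength : Int) (maxLength : Int) (maxUnique : Int) (out : Int) : Decidable (Spec_getMaxOccurrences components minLength maxLength maxUnique out) := by unfold Spec_getMaxOccurrences; infer_instance

-- ===== CLAIM (what is proved, stated in full; the proofs are below) =====
def Claim_equal_getMaxOccurrences : Prop := ∀ (components : String) (minLength : Int) (maxLength : Int) (maxUnique : Int), Dom_getMaxOccurrences components minLength maxLength maxUnique → Spec_getMaxOccurrences components minLength maxLength maxUnique (getMaxOccurrences components minLength maxLength maxUnique)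

-- ===== LEMMAS AND PROOFS =====

-- the character a port reads at Int index t (always in range where used)
def pvG (cs : List Char) (t : Int) : Char := PySem.List.pyGetD cs t ' '

-- the window of length m starting at i
def pvW (cs : List Char) (i m : Nat) : List Char := (cs.drop i).take m

-- number of start positions at which k occurs as a contiguous substring
def pvOcc (cs : List Char) (k : List Char) : Nat :=
  (List.range (cs.length + 1 - k.length)).countP (fun i => decide (pvW cs i k.length = k))

-- the multiset of keys A counts, flattened in loop order
def pvKeysA (cs : List Char) (mn mx mu : Int) : List (List Char) :=
  ((PySem.List.pyRange 0 (cs.length : Int) 1).map (fun i =>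
    ((PySem.List.pyRange i (min (cs.length : Int) (i + mx)) 1).map
      (fun j => ([] : List Char) ++ (PySem.List.pyRange i (j + 1) 1).map (pvG cs))).filter
      (pvIsValidSubstring mn mx mu))).flatten

-- the list of keys B counts
def pvKeysB (cs : List Char) (L mu : Int) : List (List Char) :=
  ((PySem.List.pyRange 0 ((cs.length : Int) - L + 1) 1).map
    (fun i => PySem.List.slice cs (some i) (some (i + L)))).filter
    (fun w => decide (((PySem.Set.ofList w).length : Int) ≤ mu))

-- max(counter(xs).values(), default=0)
def pvM (xs : List (List Char)) : Int :=
  PySem.List.maxD (PySem.Dict.counter xs).values (fun v => v) 0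

theorem pvCountPRangeUnique (m : Nat) (p : Nat → Bool) (r0 : Nat)
    (h : ∀ r, p r = true → r = r0) :
    (List.range m).countP p = if r0 < m ∧ p r0 = true then 1 else 0 := by
  by_cases hp : p r0 = true
  · have hcongr : ∀ r ∈ List.range m, (p r = true) ↔ (decide (r = r0) = true) := by
      intro r _
      simp only [decide_eq_true_eq]
      exact ⟨h r, fun hr => hr ▸ hp⟩
    rw [List.countP_congr hcongr]
    by_cases hr : r0 < m
    · simp only [hr, hp, and_self, if_true]
      have : (List.range m).countP (fun r => decide (r = r0)) = (List.range m).count r0 := by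
        rw [List.count_eq_countP]
        exact List.countP_congr (by intro x _; simp only [beq_iff_eq, decide_eq_true_eq])
      rw [this]
      exact List.count_eq_one_of_mem (List.nodup_range) (List.mem_range.mpr hr)
    · simp only [hr, false_and, if_false]
      rw [List.countP_eq_zero]
      intro r hrm
      simp only [decide_eq_true_eq]
      intro hrr; exact hr (hrr ▸ List.mem_range.mp hrm)
  · have h0 : (List.range m).countP p = 0 :=
      List.countP_eq_zero.mpr (fun r _ hr => hp ((h r hr) ▸ hr))
    simp [h0, hp]

theorem pvCountPRangeBound (n m : Nat) (hm : 1 ≤ m) (q : Nat → Bool) :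
    (List.range n).countP (fun i => decide (i + m ≤ n) && q i)
      = (List.range (n + 1 - m)).countP q := by
  by_cases hmn : m ≤ n
  · have hr : List.range n = List.range (n + 1 - m) ++ (List.range (m - 1)).map (fun x => (n + 1 - m) + x) := by
      rw [← List.range_add]; congr 1; omega
    rw [hr, List.countP_append]
    have h2 : (List.countP (fun i => decide (i + m ≤ n) && q i)
        (List.map (fun x => (n + 1 - m) + x) (List.range (m - 1)))) = 0 := by
      rw [List.countP_eq_zero]
      intro a ha
      obtain ⟨x, hx, rfl⟩ := List.mem_map.mp ha
      have hx' := List.mem_range.mp hx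
      simp only [Bool.and_eq_true, decide_eq_true_eq]
      rintro ⟨h1, -⟩
      omega
    rw [h2]
    have : ∀ i ∈ List.range (n + 1 - m), ((decide (i + m ≤ n) && q i) = true) ↔ (q i = true) := by
      intro i hi
      have := List.mem_range.mp hi
      simp only [Bool.and_eq_true, decide_eq_true_eq]
      constructor
      · exact And.right
      · exact fun hq => ⟨by omega, hq⟩
    rw [List.countP_congr this]
    omega
  · have h1 : (List.range n).countP (fun i => decide (i + m ≤ n) && q i) = 0 := by
      rw [List.countP_eq_zero]
      intro i hi
      have := List.mem_range.mp hi
      simp only [Bool.and_eq_true, decide_eq_true_eq]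
      rintro ⟨h2, -⟩; omega
    have h2 : n + 1 - m = 0 := by omega
    rw [h1, h2]; rfl

theorem pvSumMapIte {α : Type} (l : List α) (C : α → Prop) [DecidablePred C] :
    (l.map (fun i => if C i then 1 else 0)).sum = l.countP (fun i => decide (C i)) := by
  induction l with
  | nil => rfl
  | cons a t ih =>
    rw [List.map_cons, List.sum_cons, ih, List.countP_cons]
    by_cases h : C a
    · simp [h]; omega
    · simp [h]

theorem pvP_eq_W (cs : List Char) (i m : Nat) (h : i + m ≤ cs.length) :
    (PySem.List.pyRange (i : Int) ((i : Int) + (m : Int)) 1).map (pvG cs) = pvW cs i m := by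
  have hlen : (PySem.List.pyRange (i : Int) ((i : Int) + (m : Int)) 1).length = m := by
    rw [PySem.List.length_pyRange_one]; omega
  apply List.ext_getElem
  · simp only [List.length_map, hlen, pvW, List.length_take, List.length_drop]; omega
  · intro t h1 h2
    simp only [List.getElem_map]
    rw [PySem.List.getElem_pyRange_one]
    have ht : t < m := by rw [List.length_map, hlen] at h1; exact h1
    unfold pvG pvW
    have : ((i : Int) + (t : Int)) = ((i + t : Nat) : Int) := by push_cast; ring
    rw [this, PySem.List.pyGetD_natCast]
    rw [List.getElem_take, List.getElem_drop]
    rw [List.getD_eq_getElem cs ' ' (by omega)]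

theorem pvValidIff (mn mx mu : Int) (k : List Char) :
    pvIsValidSubstring mn mx mu k = true ↔
      (mn ≤ (k.length : Int) ∧ (k.length : Int) ≤ mx ∧ ((PySem.Set.ofList k).length : Int) ≤ mu) := by
  unfold pvIsValidSubstring pvCountUniqueChars
  split_ifs with h1 h2
  · simp; omega
  · simp; omega
  · simp; omega

theorem pvCountB (cs : List Char) (L mu : Int) (hL : 1 ≤ L) (k : List Char) :
    (pvKeysB cs L mu).count k
    = if ((PySem.Set.ofList k).length : Int) ≤ mu ∧ k.length = L.toNat then pvOcc cs k else 0 := by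
  unfold pvKeysB
  set Ln := L.toNat with hLn
  have hLc : (Ln : Int) = L := by omega
  by_cases hp : ((PySem.Set.ofList k).length : Int) ≤ mu
  · rw [List.count_filter (by simp [hp])]
    rw [List.count_eq_countP, List.countP_map]
    rw [PySem.List.pyRange_one, List.countP_map]
    have hN : ((cs.length : Int) - L + 1 - 0).toNat = cs.length + 1 - Ln := by omega
    rw [hN]
    by_cases hk : k.length = Ln
    · rw [if_pos ⟨hp, hk⟩]
      unfold pvOcc
      rw [hk]
      apply List.countP_congr
      intro r hr
      have hrn : r < cs.length + 1 - Ln := List.mem_range.mp hr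
      simp only [Function.comp_apply, zero_add, ← hLc, PySem.List.slice_natCast_add,
        beq_iff_eq, decide_eq_true_eq, pvW]
    · rw [if_neg (by tauto)]
      rw [List.countP_eq_zero]
      intro r hr
      have hrn : r < cs.length + 1 - Ln := List.mem_range.mp hr
      simp only [Function.comp_apply, zero_add, ← hLc, PySem.List.slice_natCast_add,
        beq_iff_eq]
      intro heq
      apply hk
      rw [← heq, List.length_take, List.length_drop]
      omega
  · rw [if_neg (by tauto)]
    rw [List.count_eq_zero]
    intro hmem
    have := (List.mem_filter.mp hmem).2
    simp only [decide_eq_true_eq] at this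
    exact hp this

theorem pvCountA (cs : List Char) (mn mx mu : Int) (k : List Char) :
    (pvKeysA cs mn mx mu).count k
    = if pvIsValidSubstring mn mx mu k = true ∧ 1 ≤ k.length then pvOcc cs k else 0 := by
  unfold pvKeysA
  rw [List.count_flatten, List.map_map]
  by_cases hvk : pvIsValidSubstring mn mx mu k = true
  case neg =>
    rw [if_neg (by tauto)]
    apply List.sum_eq_zero
    intro x hx
    obtain ⟨i, hi, rfl⟩ := List.mem_map.mp hx
    simp only [Function.comp_apply]
    rw [List.count_eq_zero]
    intro hmem
    exact hvk (List.mem_filter.mp hmem).2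
  case pos =>
    obtain ⟨hmnk, hmxk, hmuk⟩ := (pvValidIff mn mx mu k).mp hvk
    have hinner : ∀ i : Int,
        (List.count k ∘ fun i =>
          ((PySem.List.pyRange i (min (cs.length : Int) (i + mx)) 1).map
            (fun j => ([] : List Char) ++ (PySem.List.pyRange i (j + 1) 1).map (pvG cs))).filter
            (pvIsValidSubstring mn mx mu)) i
        = if (k.length - 1 < (min (cs.length : Int) (i + mx) - i).toNat ∧
              (([] : List Char) ++ (PySem.List.pyRange i (i + ((k.length - 1 : Nat) : Int) + 1) 1).map (pvG cs)) = k ∧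
              1 ≤ k.length) then 1 else 0 := by
      intro i
      simp only [Function.comp_apply]
      rw [List.count_filter hvk, List.count_eq_countP, List.countP_map,
        PySem.List.pyRange_one i (min (cs.length : Int) (i + mx)), List.countP_map]
      rw [pvCountPRangeUnique _ _ (k.length - 1) ?uniq]
      case uniq =>
        intro r hr
        simp only [Function.comp_apply, beq_iff_eq] at hr
        have hlen := congrArg List.length hr
        simp only [List.nil_append, List.length_map, PySem.List.length_pyRange_one] at hlen
        omega
      by_cases h1 : 1 ≤ k.length
      · congr 1
        rw [eq_iff_iff]
        simp only [Function.comp_apply, beq_iff_eq]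
        constructor
        · rintro ⟨ha, hb⟩
          exact ⟨ha, hb, h1⟩
        · rintro ⟨ha, hb, -⟩
          exact ⟨ha, hb⟩
      · rw [if_neg ?lenone, if_neg (by tauto)]
        case lenone =>
          rintro ⟨-, hb⟩
          simp only [Function.comp_apply, beq_iff_eq] at hb
          have hlen := congrArg List.length hb
          simp only [List.nil_append, List.length_map, PySem.List.length_pyRange_one] at hlen
          omega
    rw [List.map_congr_left (fun i _ => hinner i)]
    by_cases h1 : 1 ≤ k.length
    case neg =>
      rw [if_neg (by tauto)]
      apply List.sum_eq_zero
      intro x hx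
      obtain ⟨i, hi, rfl⟩ := List.mem_map.mp hx
      rw [if_neg (by tauto)]
    case pos =>
      rw [if_pos ⟨hvk, h1⟩]
      rw [pvSumMapIte]
      rw [PySem.List.pyRange_zero_nat cs.length, List.countP_map]
      have hcongr : ∀ r ∈ List.range cs.length,
          ((fun i => decide (k.length - 1 < (min (cs.length : Int) (i + mx) - i).toNat ∧
              (([] : List Char) ++ (PySem.List.pyRange i (i + ((k.length - 1 : Nat) : Int) + 1) 1).map (pvG cs)) = k ∧
              1 ≤ k.length)) ∘ (fun (r : Nat) => (r : Int))) r = true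
          ↔ ((fun r => decide (r + k.length ≤ cs.length) && decide (pvW cs r k.length = k)) r = true) := by
        intro r hr
        simp only [Function.comp_apply, decide_eq_true_eq, Bool.and_eq_true, List.nil_append]
        have harg : ((r : Int) + ((k.length - 1 : Nat) : Int) + 1) = (r : Int) + (k.length : Int) := by
          omega
        rw [harg]
        constructor
        · rintro ⟨ha, hb, -⟩
          have hbd : r + k.length ≤ cs.length := by omega
          refine ⟨hbd, ?_⟩
          rw [pvP_eq_W cs r k.length hbd] at hb
          exact hb
        · rintro ⟨hbd, hw⟩
          refine ⟨by omega, ?_, h1⟩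
          rw [pvP_eq_W cs r k.length hbd]
          exact hw
      rw [List.countP_congr hcongr]
      rw [pvCountPRangeBound cs.length k.length h1]
      rfl

theorem pvInnerA (cs : List Char) (mn mx mu : Int) (t : Int) :
    ∀ (N : Nat) (a : Int), N = (t - a).toNat → ∀ (s0 : List Char) (d : PySem.Dict (List Char) Int),
    ((PySem.List.pyRange a t 1).foldl
      (fun (p : List Char × PySem.Dict (List Char) Int) j =>
        let substr := p.1 ++ [PySem.List.pyGetD cs j ' ']
        (substr,
          if pvIsValidSubstring mn mx mu substr then p.2.modify substr 0 (· + 1) else p.2))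
      (s0, d)).2
    = (((PySem.List.pyRange a t 1).map
        (fun j => s0 ++ (PySem.List.pyRange a (j + 1) 1).map (pvG cs))).filter
        (pvIsValidSubstring mn mx mu)).foldl (fun d s => d.modify s 0 (· + 1)) d := by
  intro N
  induction N with
  | zero =>
    intro a hN s0 d
    rw [PySem.List.pyRange_one_eq_nil (by omega)]
    rfl
  | succ N ih =>
    intro a hN s0 d
    have hlt : a < t := by omega
    rw [PySem.List.pyRange_one_cons hlt]
    simp only [List.foldl_cons, List.map_cons]
    have hfirst : s0 ++ (PySem.List.pyRange a (a + 1) 1).map (pvG cs) = s0 ++ [PySem.List.pyGetD cs a ' '] := by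
      rw [PySem.List.pyRange_one_singleton]; rfl
    rw [hfirst]
    have htail : (PySem.List.pyRange (a+1) t 1).map
        (fun j => s0 ++ (PySem.List.pyRange a (j + 1) 1).map (pvG cs))
      = (PySem.List.pyRange (a+1) t 1).map
        (fun j => (s0 ++ [PySem.List.pyGetD cs a ' ']) ++ (PySem.List.pyRange (a+1) (j + 1) 1).map (pvG cs)) := by
      apply List.map_congr_left
      intro j hj
      have hj' : a + 1 ≤ j := (PySem.List.mem_pyRange_one.mp hj).1
      rw [PySem.List.pyRange_one_cons (by omega : a < j + 1), List.map_cons,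
        ← List.singleton_append, ← List.append_assoc]
      rfl
    rw [htail]
    set s1 := s0 ++ [PySem.List.pyGetD cs a ' '] with hs1
    by_cases hv : pvIsValidSubstring mn mx mu s1 = true
    · rw [List.filter_cons_of_pos hv]
      simp only [List.foldl_cons]
      have := ih (a+1) (by omega) s1 (d.modify s1 0 (· + 1))
      simp only [if_pos hv]
      exact this
    · rw [List.filter_cons_of_neg (by simp [hv])]
      have := ih (a+1) (by omega) s1 d
      simp only [if_neg (by simp [hv] : ¬ pvIsValidSubstring mn mx mu s1 = true)]
      -- goal should now match ih
      exact this

set_option maxHeartbeats 1000000 in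
theorem pvA_eq (components : String) (mn mx mu : Int) :
    getMaxOccurrences components mn mx mu = pvM (pvKeysA components.toList mn mx mu) := by
  simp only [getMaxOccurrences, pvM, pvKeysA]
  congr 2
  rw [PySem.Dict.counter_eq_foldl, List.foldl_flatten, List.foldl_map]
  congr 1
  funext d i
  exact pvInnerA components.toList mn mx mu (min ((components.toList.length : Int)) (i + mx)) _ i rfl [] d

theorem pvB_eq (components : String) (mn mx mu : Int) (h : ¬ max mn 1 > mx) :
    getMaxOccurrences_alt components mn mx mu = pvM (pvKeysB components.toList (max mn 1) mu) := by
  unfold getMaxOccurrences_alt pvM pvKeysB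
  rw [if_neg h]
  rw [← PySem.Dict.foldl_insert_getD_add_one_eq_counter, List.foldl_filter, List.foldl_map]
  simp only [decide_eq_true_eq]


-- a shorter prefix occurs at least as often
theorem pvOccTakeLe (cs k : List Char) (m : Nat) (hm : m ≤ k.length) :
    pvOcc cs k ≤ pvOcc cs (k.take m) := by
  unfold pvOcc
  have hlen : (k.take m).length = m := by simp [hm]
  rw [hlen]
  have step1 : (List.range (cs.length + 1 - k.length)).countP (fun i => decide (pvW cs i k.length = k))
      ≤ (List.range (cs.length + 1 - k.length)).countP (fun i => decide (pvW cs i m = k.take m)) := by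
    apply List.countP_mono_left
    intro i _ hp
    simp only [decide_eq_true_eq] at hp ⊢
    rw [← hp]
    unfold pvW
    rw [List.take_take]
    congr 1
    omega
  exact le_trans step1 (List.Sublist.countP_le (List.range_sublist.mpr (by omega)))

theorem pvValuesCounter (xs : List (List Char)) :
    (PySem.Dict.counter xs).values = (PySem.Set.ofList xs).map (fun k => ((xs.count k : Int))) := by
  rw [PySem.Dict.values_eq_map_keys _ (PySem.Dict.nodup_keys_counter xs) 0, PySem.Dict.keys_counter]
  exact List.map_congr_left (fun k _ => PySem.Dict.getD_counter xs k)

theorem pvM_count_le (xs : List (List Char)) (k : List Char) (h : k ∈ xs) :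
    (xs.count k : Int) ≤ pvM xs := by
  have hv := pvValuesCounter xs
  have hmem : ((xs.count k : Int)) ∈ (PySem.Dict.counter xs).values := by
    rw [hv]; exact List.mem_map.mpr ⟨k, (PySem.Set.mem_ofList xs k).mpr h, rfl⟩
  unfold pvM PySem.List.maxD
  cases hmax : PySem.List.max? (PySem.Dict.counter xs).values (fun v => v) with
  | none => rw [(PySem.List.max?_eq_none_iff _ _).mp hmax] at hmem; simp at hmem
  | some m => simpa using PySem.List.max?_isMax hmax _ hmem

theorem pvM_spec (xs : List (List Char)) (h : xs ≠ []) :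
    ∃ k ∈ xs, pvM xs = (xs.count k : Int) := by
  have hv := pvValuesCounter xs
  cases hmax : PySem.List.max? (PySem.Dict.counter xs).values (fun v => v) with
  | none =>
    exfalso
    have hnil := (PySem.List.max?_eq_none_iff _ _).mp hmax
    rw [hv] at hnil
    cases xs with
    | nil => exact h rfl
    | cons a l =>
      have : a ∈ PySem.Set.ofList (a :: l) := (PySem.Set.mem_ofList _ a).mpr (by simp)
      rcases List.map_eq_nil_iff.mp hnil with h2
      rw [h2] at this; simp at this
  | some m =>
    have hm := PySem.List.max?_mem hmax
    rw [hv] at hm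
    obtain ⟨k, hk, hkm⟩ := List.mem_map.mp hm
    exact ⟨k, (PySem.Set.mem_ofList xs k).mp hk, by unfold pvM PySem.List.maxD; rw [hmax]; simp [hkm]⟩

theorem pvUniqTakeLe (k : List Char) (m : Nat) :
    (PySem.Set.ofList (k.take m)).length ≤ (PySem.Set.ofList k).length := by
  have h1 : ∀ (l : List Char), (PySem.Set.ofList l).length = l.toFinset.card := by
    intro l
    rw [← List.toFinset_card_of_nodup (PySem.Set.nodup_ofList l)]
    congr 1
    ext x
    simp [List.mem_toFinset, PySem.Set.mem_ofList]
  rw [h1, h1]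
  apply Finset.card_le_card
  intro x hx
  simp only [List.mem_toFinset] at *
  exact List.take_subset m k hx
theorem pvM_eq (xs ys : List (List Char))
    (h1 : ∀ k ∈ ys, ys.count k = xs.count k)
    (h2 : ∀ k ∈ xs, ∃ k', k' ∈ ys ∧ xs.count k ≤ ys.count k') : pvM xs = pvM ys := by
  have hys : ∀ k ∈ ys, k ∈ xs := by
    intro k hk
    have := h1 k hk
    have hpos : 0 < ys.count k := List.count_pos_iff.mpr hk
    exact List.count_pos_iff.mp (by omega)
  by_cases hx : xs = []
  · subst hx
    have : ys = [] := by
      cases ys with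
      | nil => rfl
      | cons a l => exact absurd (hys a (by simp)) (by simp)
    rw [this]
  · obtain ⟨k0, hk0, hM0⟩ := pvM_spec xs hx
    obtain ⟨k', hk', hle⟩ := h2 k0 hk0
    have hyne : ys ≠ [] := by intro hn; rw [hn] at hk'; exact absurd hk' (by simp)
    obtain ⟨k1, hk1, hM1⟩ := pvM_spec ys hyne
    have hA_le : pvM xs ≤ pvM ys := by
      have := pvM_count_le ys k' hk'
      omega
    have hB_le : pvM ys ≤ pvM xs := by
      have hcnt := h1 k1 hk1
      have := pvM_count_le xs k1 (hys k1 hk1)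
      omega
    omega


-- ===== VERDICT (by name: the statement is the Claim_ definition above) =====
theorem getMaxOccurrences_spec : Claim_equal_getMaxOccurrences := by
  intro components mn mx mu _dom
  unfold Spec_getMaxOccurrences
  by_cases hb : max mn 1 > mx
  · have hBalt : getMaxOccurrences_alt components mn mx mu = 0 := by
      unfold getMaxOccurrences_alt
      rw [if_pos hb]
    rw [pvA_eq components mn mx mu, hBalt]
    have hnil : pvKeysA components.toList mn mx mu = [] := by
      rw [List.eq_nil_iff_forall_not_mem]
      intro k hk
      have hpos := List.count_pos_iff.mpr hk
      rw [pvCountA] at hpos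
      by_cases hc : pvIsValidSubstring mn mx mu k = true ∧ 1 ≤ k.length
      · obtain ⟨hv, h1⟩ := hc
        obtain ⟨ha, hb2, -⟩ := (pvValidIff mn mx mu k).mp hv
        omega
      · rw [if_neg hc] at hpos
        omega
    rw [hnil]
    rfl
  · rw [pvA_eq components mn mx mu, pvB_eq components mn mx mu hb]
    have hL1 : (1 : Int) ≤ max mn 1 := le_max_right mn 1
    have hLmx : max mn 1 ≤ mx := by omega
    apply pvM_eq
    · intro k hk
      have hkpos := List.count_pos_iff.mpr hk
      rw [pvCountB components.toList (max mn 1) mu hL1 k] at hkpos ⊢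
      by_cases hc : ((PySem.Set.ofList k).length : Int) ≤ mu ∧ k.length = (max mn 1).toNat
      · rw [if_pos hc, pvCountA]
        obtain ⟨hmu, hlen⟩ := hc
        have hvalid : pvIsValidSubstring mn mx mu k = true := by
          rw [pvValidIff]
          exact ⟨by omega, by omega, hmu⟩
        rw [if_pos ⟨hvalid, by omega⟩]
      · rw [if_neg hc] at hkpos
        omega
    · intro k hk
      have hkpos := List.count_pos_iff.mpr hk
      rw [pvCountA] at hkpos
      by_cases hc : pvIsValidSubstring mn mx mu k = true ∧ 1 ≤ k.length
      case neg =>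
        rw [if_neg hc] at hkpos
        omega
      obtain ⟨hv, h1⟩ := hc
      rw [if_pos ⟨hv, h1⟩] at hkpos
      obtain ⟨hmn', hmx', hmu'⟩ := (pvValidIff mn mx mu k).mp hv
      have hLk : (max mn 1).toNat ≤ k.length := by omega
      have htlen : (k.take (max mn 1).toNat).length = (max mn 1).toNat := by simp [hLk]
      have htmu : ((PySem.Set.ofList (k.take (max mn 1).toNat)).length : Int) ≤ mu := by
        have := pvUniqTakeLe k (max mn 1).toNat
        omega
      have hcntB : (pvKeysB components.toList (max mn 1) mu).count (k.take (max mn 1).toNat)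
          = pvOcc components.toList (k.take (max mn 1).toNat) := by
        rw [pvCountB components.toList (max mn 1) mu hL1, if_pos ⟨htmu, htlen⟩]
      have hocc := pvOccTakeLe components.toList k (max mn 1).toNat hLk
      refine ⟨k.take (max mn 1).toNat, ?_, ?_⟩
      · apply List.count_pos_iff.mp
        rw [hcntB]
        omega
      · rw [pvCountA, if_pos ⟨hv, h1⟩, hcntB]
        exact hocc
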